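-- pv_equiv track=rewrite | github.com/MisterMcGhee/LegoSorting | tools/bag_inventory_tool/utils/fuzzy_match.py | normalize_element_id
-- ===== SOURCE A (Python) =====
-- def normalize_element_id(element_id: str) -> str:
--     """
--     Normalize an element ID for comparison.
--
--     Common OCR mistakes:
--     - O (letter) ↔ 0 (digit)
--     - I (letter) ↔ 1 (digit)
--     - l (lowercase L) ↔ 1 (digit)
--     - S ↔ 5
--     - Z ↔ 2
--
--     Args:
--         element_id: Element ID to normalize
--
--     Returns:
--         Normalized element ID
--     """
--     normalized = element_id.upper()
--
--     # Replace common OCR mistakes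
--     replacements = {
--         'O': '0',
--         'I': '1',
--         'L': '1',
--         'S': '5',
--         'Z': '2'
--     }
--
--     for old, new in replacements.items():
--         normalized = normalized.replace(old, new)
--
--     return normalized
-- ===== SOURCE B (Python) =====
-- def normalize_element_id(element_id: str) -> str:
--     """Single pass: map each uppercased character through a fixed OCR table."""
--     table = {'O': '0', 'I': '1', 'L': '1', 'S': '5', 'Z': '2'}
--     out = []
--     for c in element_id.upper():
--         out.append(table.get(c, c))
--     return ''.join(out)
-- ===== Notes on version B (the rewrite author's own statement) =====
-- stated objective: alternative
-- what changed: Replaces five sequential full-string str.replace passes with a single pass over the uppercased string mapping each character through a fixed OCR table.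
import Mathlib
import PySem

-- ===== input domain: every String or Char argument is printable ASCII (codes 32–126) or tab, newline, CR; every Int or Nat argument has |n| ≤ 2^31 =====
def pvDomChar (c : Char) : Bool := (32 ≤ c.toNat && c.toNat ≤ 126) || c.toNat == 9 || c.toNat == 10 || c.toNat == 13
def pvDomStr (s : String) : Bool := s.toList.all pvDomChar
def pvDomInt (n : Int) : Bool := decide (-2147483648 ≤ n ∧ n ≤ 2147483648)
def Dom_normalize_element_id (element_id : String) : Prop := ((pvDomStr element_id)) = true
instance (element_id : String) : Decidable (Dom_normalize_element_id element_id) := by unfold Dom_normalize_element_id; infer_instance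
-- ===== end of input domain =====

-- B replaces A's five sequential full-string replace passes with one pass mapping each char through a fixed table (objective: alternative).

-- ===== PORT A =====
-- the literal dict of A, as a PySem.Dict built in insertion order
def pvReplacementsA : PySem.Dict String String :=
  (((((PySem.Dict.empty.insert "O" "0").insert "I" "1").insert "L" "1").insert "S" "5").insert "Z" "2")

def normalize_element_id (element_id : String) : String :=
  let normalized := PySem.Str.upper element_id
  pvReplacementsA.items.foldl (fun normalized p => PySem.Str.replace normalized p.1 p.2) normalized

-- ===== PORT B =====
-- B's dict keyed by single characters (its values are single characters, so Char × Char)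
def pvTableB : PySem.Dict Char Char :=
  (((((PySem.Dict.empty.insert 'O' '0').insert 'I' '1').insert 'L' '1').insert 'S' '5').insert 'Z' '2')

-- loop 'for c in …: out.append(table.get(c, c))' then ''.join(out); join of 1-char strings = String.mk of chars
def normalize_element_id_alt (element_id : String) : String :=
  String.ofList ((PySem.Str.upper element_id).toList.foldl (fun out c => out ++ [pvTableB.getD c c]) [])

-- ===== PRECONDITION & SPEC =====
def Spec_normalize_element_id (element_id : String) (out : String) : Prop := out = normalize_element_id_alt element_id
instance (element_id : String) (out : String) : Decidable (Spec_normalize_element_id element_id out) := by unfold Spec_normalize_element_id; infer_instance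

-- ===== CLAIM (what is proved, stated in full; the proofs are below) =====
def Claim_equal_normalize_element_id : Prop := ∀ (element_id : String), Dom_normalize_element_id element_id → Spec_normalize_element_id element_id (normalize_element_id element_id)

-- ===== LEMMAS AND PROOFS =====

-- single-char replace is a character map
theorem replace_go_single (o n : Char) :
    ∀ (l : List Char) (fuel : Nat) (acc : List Char), l.length ≤ fuel →
      PySem.Chars.replace.go [o] [n] fuel l acc
        = acc.reverse ++ l.map (fun c => if c = o then n else c) := by
  intro l
  induction l with
  | nil =>
    intro fuel acc _
    cases fuel <;> simp [PySem.Chars.replace.go]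
  | cons c t ih =>
    intro fuel acc h
    cases fuel with
    | zero => simp at h
    | succ f =>
      simp only [PySem.Chars.replace.go, List.isPrefixOf, List.map_cons]
      by_cases hc : c = o
      · simp [hc, ih f (n :: acc) (by simpa using h)]
      · simp [Ne.symm hc, hc, ih f (c :: acc) (by simpa using h)]

theorem replace_single (o n : Char) (s : List Char) :
    PySem.Chars.replace s [o] [n] = s.map (fun c => if c = o then n else c) := by
  simp [PySem.Chars.replace, replace_go_single o n s s.length [] (le_refl _)]

-- B's append-accumulator fold is the map
theorem foldl_append_map {α β : Type} (f : α → β) :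
    ∀ (l : List α) (acc : List β), l.foldl (fun out c => out ++ [f c]) acc = acc ++ l.map f := by
  intro l
  induction l with
  | nil => simp
  | cons c t ih => intro acc; simp [List.foldl, ih]

-- B's table lookup as an if-chain on the character
theorem char_step (c : Char) :
    pvTableB.getD c c
      = if c = 'O' then '0' else if c = 'I' then '1' else if c = 'L' then '1'
        else if c = 'S' then '5' else if c = 'Z' then '2' else c := by
  by_cases h1 : c = 'O'
  · subst h1; decide
  by_cases h2 : c = 'I'
  · subst h2; decide
  by_cases h3 : c = 'L'
  · subst h3; decide
  by_cases h4 : c = 'S'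
  · subst h4; decide
  by_cases h5 : c = 'Z'
  · subst h5; decide
  have e1 : ('O' == c) = false := beq_eq_false_iff_ne.mpr (Ne.symm h1)
  have e2 : ('I' == c) = false := beq_eq_false_iff_ne.mpr (Ne.symm h2)
  have e3 : ('L' == c) = false := beq_eq_false_iff_ne.mpr (Ne.symm h3)
  have e4 : ('S' == c) = false := beq_eq_false_iff_ne.mpr (Ne.symm h4)
  have e5 : ('Z' == c) = false := beq_eq_false_iff_ne.mpr (Ne.symm h5)
  simp [pvTableB, PySem.Dict.getD, PySem.Dict.get?, PySem.Dict.insert, PySem.Dict.empty,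
    List.find?, e1, e2, e3, e4, e5, h1, h2, h3, h4, h5]

-- ===== VERDICT (by name: the statement is the Claim_ definition above) =====
theorem normalize_element_id_spec : Claim_equal_normalize_element_id := by
  intro e _
  unfold Spec_normalize_element_id normalize_element_id normalize_element_id_alt
  apply String.toList_inj.mp
  have hitems : pvReplacementsA.items
      = [("O","0"),("I","1"),("L","1"),("S","5"),("Z","2")] := by decide
  simp only [hitems, List.foldl, foldl_append_map, List.nil_append, String.toList_ofList,
    PySem.Str.toList_replace, PySem.Str.toList_upper]
  simp only [show ("O":String).toList = ['O'] from rfl, show ("0":String).toList = ['0'] from rfl,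
    show ("I":String).toList = ['I'] from rfl, show ("1":String).toList = ['1'] from rfl,
    show ("L":String).toList = ['L'] from rfl, show ("S":String).toList = ['S'] from rfl,
    show ("5":String).toList = ['5'] from rfl, show ("Z":String).toList = ['Z'] from rfl,
    show ("2":String).toList = ['2'] from rfl, replace_single, List.map_map]
  apply List.map_congr_left
  intro c _
  simp only [Function.comp_apply]
  rw [char_step]
  by_cases h1 : c = 'O'
  · subst h1; decide
  by_cases h2 : c = 'I'
  · subst h2; decide
  by_cases h3 : c = 'L'
  · subst h3; decide
  by_cases h4 : c = 'S'
  · subst h4; decide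
  by_cases h5 : c = 'Z'
  · subst h5; decide
  simp [h1, h2, h3, h4, h5]
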